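-- pv_equiv track=rewrite | github.com/UdayPatnala/Spedex | backend/app/database.py | _normalise_db_url
-- ===== SOURCE A (Python) =====
-- def _normalise_db_url(url: str) -> str:
--     """Ensure the URL uses the psycopg2 driver so SQLAlchemy can find it.
--
--     Vercel's Python environment ships psycopg2-binary. Normalise any of:
--       postgresql://...
--       postgresql+psycopg://...    (psycopg v3)
--       postgres://...              (common shorthand)
--     to:
--       postgresql+psycopg2://...
--     """
--     for prefix in (
--         "postgresql+psycopg://",
--         "postgres+psycopg://",
--         "postgresql+psycopg2://",
--         "postgres+psycopg2://",
--         "postgresql://",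
--         "postgres://",
--     ):
--         if url.startswith(prefix):
--             rest = url[len(prefix):]
--             return f"postgresql+psycopg2://{rest}"
--     return url
-- ===== SOURCE B (Python) =====
-- _SCHEMES = {
--     "postgresql+psycopg",
--     "postgres+psycopg",
--     "postgresql+psycopg2",
--     "postgres+psycopg2",
--     "postgresql",
--     "postgres",
-- }
--
--
-- def _normalise_db_url(url: str) -> str:
--     """Parse the scheme once and decide by set membership instead of a
--     sequential prefix scan."""
--     scheme, sep, rest = url.partition("://")
--     if sep and scheme in _SCHEMES:
--         return f"postgresql+psycopg2://{rest}"
--     return url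
-- ===== Notes on version B (the rewrite author's own statement) =====
-- stated objective: idiomatic
-- what changed: Replaces the ordered six-way startswith scan (each prefix re-reading the front of the URL) by a single partition at the first scheme separator followed by one set-membership test of the scheme.
import Mathlib
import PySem

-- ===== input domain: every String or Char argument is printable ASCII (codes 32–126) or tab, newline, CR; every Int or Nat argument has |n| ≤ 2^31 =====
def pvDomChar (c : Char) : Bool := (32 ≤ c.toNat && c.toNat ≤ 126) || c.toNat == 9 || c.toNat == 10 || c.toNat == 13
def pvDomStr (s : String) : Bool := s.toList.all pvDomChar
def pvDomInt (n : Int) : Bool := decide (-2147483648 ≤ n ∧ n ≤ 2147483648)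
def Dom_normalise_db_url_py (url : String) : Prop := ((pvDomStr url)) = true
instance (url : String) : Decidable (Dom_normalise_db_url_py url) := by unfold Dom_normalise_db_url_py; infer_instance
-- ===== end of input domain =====

-- B replaces A's ordered six-way startswith scan by one partition at the first "://" plus a set-membership test of the scheme; return values are proved identical.


-- ===== PORT A =====
-- the literal tuple of prefixes A iterates over, in A's order
def pvPrefixes : List String :=
  ["postgresql+psycopg://", "postgres+psycopg://", "postgresql+psycopg2://",
   "postgres+psycopg2://", "postgresql://", "postgres://"]

-- the 'for prefix in (...)' loop: first matching prefix wins, else fall through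
def pvLoopA (url : String) : List String → String
  | [] => url
  | p :: ps =>
    if PySem.Str.startswith url p then
      "postgresql+psycopg2://" ++ PySem.Str.slice url (some (PySem.Str.len p)) none
    else pvLoopA url ps

def normalise_db_url_py (url : String) : String := pvLoopA url pvPrefixes

-- ===== PORT B =====
-- hand port of Python's str.partition("://"): scans for the first occurrence of
-- "://"; 'some (before, after)' if found (sep non-empty), 'none' otherwise — exact
def pvPart3 : List Char → Option (List Char × List Char)
  | [] => none
  | c :: cs =>
    if c = ':' ∧ cs.take 2 = ['/', '/'] then some ([], cs.drop 2)
    else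
      match pvPart3 cs with
      | some (s, r) => some (c :: s, r)
      | none => none

def pvSchemes : PySem.Set String :=
  PySem.Set.ofList ["postgresql+psycopg", "postgres+psycopg", "postgresql+psycopg2",
                    "postgres+psycopg2", "postgresql", "postgres"]

def normalise_db_url_py_alt (url : String) : String :=
  match pvPart3 url.toList with
  | some (scheme, rest) =>
      if PySem.Set.contains pvSchemes (String.ofList scheme) then
        "postgresql+psycopg2://" ++ String.ofList rest
      else url
  | none => url

-- ===== PRECONDITION & SPEC =====
def Spec_normalise_db_url_py (url : String) (out : String) : Prop := out = normalise_db_url_py_alt url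
instance (url : String) (out : String) : Decidable (Spec_normalise_db_url_py url out) := by unfold Spec_normalise_db_url_py; infer_instance

-- ===== CLAIM (what is proved, stated in full; the proofs are below) =====
def Claim_equal_normalise_db_url_py : Prop := ∀ (url : String), Dom_normalise_db_url_py url → Spec_normalise_db_url_py url (normalise_db_url_py url)

-- ===== LEMMAS AND PROOFS =====

theorem part3_of_no_colon (s r : List Char) (h : ':' ∉ s) :
    pvPart3 (s ++ ':' :: '/' :: '/' :: r) = some (s, r) := by
  induction s with
  | nil => simp [pvPart3]
  | cons c cs ih =>
    have hc : ¬ c = ':' := by intro hc; exact h (hc ▸ List.mem_cons_self ..)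
    have ih' := ih (fun hm => h (List.mem_cons_of_mem _ hm))
    simp [pvPart3, hc, ih']

theorem part3_sound (l s r : List Char) (h : pvPart3 l = some (s, r)) :
    l = s ++ ':' :: '/' :: '/' :: r := by
  induction l generalizing s r with
  | nil => simp [pvPart3] at h
  | cons c cs ih =>
    by_cases hc : c = ':' ∧ cs.take 2 = ['/', '/']
    · simp [pvPart3, hc] at h
      obtain ⟨hs, hr⟩ := h
      subst hs; subst hr
      rcases cs with _ | ⟨a, _ | ⟨b, t⟩⟩ <;> simp_all [hc.1]
    · simp only [pvPart3, if_neg hc] at h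
      cases heq : pvPart3 cs with
      | none => rw [heq] at h; simp at h
      | some pr =>
        obtain ⟨s', r'⟩ := pr
        rw [heq] at h
        simp at h
        obtain ⟨hs, hr⟩ := h
        subst hs; subst hr
        simp [ih _ _ heq]

theorem notpref (l p : List Char) (h : PySem.Chars.startswith l p = false) :
    ¬ (p <+: l) := fun hp =>
  Bool.noConfusion ((((PySem.Chars.startswith_iff l p).mpr hp).symm).trans h)

theorem pref (l p : List Char) (h : PySem.Chars.startswith l p = true) :
    ∃ r, l = p ++ r := by
  rw [PySem.Chars.startswith_iff] at h
  obtain ⟨r, hr⟩ := h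
  exact ⟨r, hr.symm⟩

theorem sliceA (url : String) (pl r : List Char) (hu : url.toList = pl ++ r) :
    PySem.Str.slice url (some (pl.length : Int)) none = String.ofList r := by
  have htl : (PySem.Str.slice url (some (pl.length : Int)) none).toList = r := by
    rw [PySem.Str.toList_slice, PySem.Chars.slice_eq_listSlice,
        PySem.List.slice_from_natCast, hu, List.drop_left]
  apply String.toList_inj.mp
  rw [htl]
  simp

theorem altB_of_prefix (url : String) (scl r : List Char)
    (hm : PySem.Set.contains pvSchemes (String.ofList scl) = true) (hcol : ':' ∉ scl)
    (hu : url.toList = scl ++ ':' :: '/' :: '/' :: r) :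
    normalise_db_url_py_alt url = "postgresql+psycopg2://" ++ String.ofList r := by
  have hm' : String.ofList scl ∈ pvSchemes := by simpa [PySem.Set.contains] using hm
  unfold normalise_db_url_py_alt
  rw [hu, part3_of_no_colon _ _ hcol]
  simp [hm']

-- A = B with no Dom hypothesis (the equality is unconditional)
theorem ab_eq (url : String) : normalise_db_url_py url = normalise_db_url_py_alt url := by
  by_cases h1 : PySem.Chars.startswith url.toList ['p', 'o', 's', 't', 'g', 'r', 'e', 's', 'q', 'l', '+', 'p', 's', 'y', 'c', 'o', 'p', 'g', ':', '/', '/'] = true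
  · obtain ⟨r, hr⟩ := pref _ _ h1
    have hu : url.toList = ['p', 'o', 's', 't', 'g', 'r', 'e', 's', 'q', 'l', '+', 'p', 's', 'y', 'c', 'o', 'p', 'g'] ++ ':' :: '/' :: '/' :: r := by rw [hr]; rfl
    have hsl := sliceA url ['p', 'o', 's', 't', 'g', 'r', 'e', 's', 'q', 'l', '+', 'p', 's', 'y', 'c', 'o', 'p', 'g', ':', '/', '/'] r hr
    norm_num at hsl
    rw [altB_of_prefix url ['p', 'o', 's', 't', 'g', 'r', 'e', 's', 'q', 'l', '+', 'p', 's', 'y', 'c', 'o', 'p', 'g'] r (by decide) (by decide) hu]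
    simp [normalise_db_url_py, pvPrefixes, pvLoopA, h1, hsl]
  ·
    by_cases h2 : PySem.Chars.startswith url.toList ['p', 'o', 's', 't', 'g', 'r', 'e', 's', '+', 'p', 's', 'y', 'c', 'o', 'p', 'g', ':', '/', '/'] = true
    · obtain ⟨r, hr⟩ := pref _ _ h2
      have hu : url.toList = ['p', 'o', 's', 't', 'g', 'r', 'e', 's', '+', 'p', 's', 'y', 'c', 'o', 'p', 'g'] ++ ':' :: '/' :: '/' :: r := by rw [hr]; rfl
      have hsl := sliceA url ['p', 'o', 's', 't', 'g', 'r', 'e', 's', '+', 'p', 's', 'y', 'c', 'o', 'p', 'g', ':', '/', '/'] r hr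
      norm_num at hsl
      rw [altB_of_prefix url ['p', 'o', 's', 't', 'g', 'r', 'e', 's', '+', 'p', 's', 'y', 'c', 'o', 'p', 'g'] r (by decide) (by decide) hu]
      simp [normalise_db_url_py, pvPrefixes, pvLoopA, h1, h2, hsl]
    ·
      by_cases h3 : PySem.Chars.startswith url.toList ['p', 'o', 's', 't', 'g', 'r', 'e', 's', 'q', 'l', '+', 'p', 's', 'y', 'c', 'o', 'p', 'g', '2', ':', '/', '/'] = true
      · obtain ⟨r, hr⟩ := pref _ _ h3
        have hu : url.toList = ['p', 'o', 's', 't', 'g', 'r', 'e', 's', 'q', 'l', '+', 'p', 's', 'y', 'c', 'o', 'p', 'g', '2'] ++ ':' :: '/' :: '/' :: r := by rw [hr]; rfl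
        have hsl := sliceA url ['p', 'o', 's', 't', 'g', 'r', 'e', 's', 'q', 'l', '+', 'p', 's', 'y', 'c', 'o', 'p', 'g', '2', ':', '/', '/'] r hr
        norm_num at hsl
        rw [altB_of_prefix url ['p', 'o', 's', 't', 'g', 'r', 'e', 's', 'q', 'l', '+', 'p', 's', 'y', 'c', 'o', 'p', 'g', '2'] r (by decide) (by decide) hu]
        simp [normalise_db_url_py, pvPrefixes, pvLoopA, h1, h2, h3, hsl]
      ·
        by_cases h4 : PySem.Chars.startswith url.toList ['p', 'o', 's', 't', 'g', 'r', 'e', 's', '+', 'p', 's', 'y', 'c', 'o', 'p', 'g', '2', ':', '/', '/'] = true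
        · obtain ⟨r, hr⟩ := pref _ _ h4
          have hu : url.toList = ['p', 'o', 's', 't', 'g', 'r', 'e', 's', '+', 'p', 's', 'y', 'c', 'o', 'p', 'g', '2'] ++ ':' :: '/' :: '/' :: r := by rw [hr]; rfl
          have hsl := sliceA url ['p', 'o', 's', 't', 'g', 'r', 'e', 's', '+', 'p', 's', 'y', 'c', 'o', 'p', 'g', '2', ':', '/', '/'] r hr
          norm_num at hsl
          rw [altB_of_prefix url ['p', 'o', 's', 't', 'g', 'r', 'e', 's', '+', 'p', 's', 'y', 'c', 'o', 'p', 'g', '2'] r (by decide) (by decide) hu]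
          simp [normalise_db_url_py, pvPrefixes, pvLoopA, h1, h2, h3, h4, hsl]
        ·
          by_cases h5 : PySem.Chars.startswith url.toList ['p', 'o', 's', 't', 'g', 'r', 'e', 's', 'q', 'l', ':', '/', '/'] = true
          · obtain ⟨r, hr⟩ := pref _ _ h5
            have hu : url.toList = ['p', 'o', 's', 't', 'g', 'r', 'e', 's', 'q', 'l'] ++ ':' :: '/' :: '/' :: r := by rw [hr]; rfl
            have hsl := sliceA url ['p', 'o', 's', 't', 'g', 'r', 'e', 's', 'q', 'l', ':', '/', '/'] r hr
            norm_num at hsl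
            rw [altB_of_prefix url ['p', 'o', 's', 't', 'g', 'r', 'e', 's', 'q', 'l'] r (by decide) (by decide) hu]
            simp [normalise_db_url_py, pvPrefixes, pvLoopA, h1, h2, h3, h4, h5, hsl]
          ·
            by_cases h6 : PySem.Chars.startswith url.toList ['p', 'o', 's', 't', 'g', 'r', 'e', 's', ':', '/', '/'] = true
            · obtain ⟨r, hr⟩ := pref _ _ h6
              have hu : url.toList = ['p', 'o', 's', 't', 'g', 'r', 'e', 's'] ++ ':' :: '/' :: '/' :: r := by rw [hr]; rfl
              have hsl := sliceA url ['p', 'o', 's', 't', 'g', 'r', 'e', 's', ':', '/', '/'] r hr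
              norm_num at hsl
              rw [altB_of_prefix url ['p', 'o', 's', 't', 'g', 'r', 'e', 's'] r (by decide) (by decide) hu]
              simp [normalise_db_url_py, pvPrefixes, pvLoopA, h1, h2, h3, h4, h5, h6, hsl]
            ·
              -- no prefix matches: A returns url; show B does too
              have hA : normalise_db_url_py url = url := by
                simp [normalise_db_url_py, pvPrefixes, pvLoopA, h1, h2, h3, h4, h5, h6]
              rw [hA]
              unfold normalise_db_url_py_alt
              cases hp : pvPart3 url.toList with
              | none => rfl
              | some pr =>
                obtain ⟨s, r⟩ := pr
                have hl := part3_sound _ _ _ hp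
                by_cases hm : PySem.Set.contains pvSchemes (String.ofList s) = true
                · exfalso
                  have hmem : String.ofList s ∈
                      (["postgresql+psycopg", "postgres+psycopg", "postgresql+psycopg2",
                        "postgres+psycopg2", "postgresql", "postgres"] : List String) := by
                    have he : pvSchemes = ["postgresql+psycopg", "postgres+psycopg",
                        "postgresql+psycopg2", "postgres+psycopg2", "postgresql",
                        "postgres"] := by decide
                    rw [he] at hm
                    simpa [PySem.Set.contains] using hm
                  have hof : ∀ (t : String), String.ofList s = t → s = t.toList := by
                    intro t ht
                    have h2' := congrArg String.toList ht
                    simpa using h2'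
                  simp only [List.mem_cons, List.not_mem_nil, or_false] at hmem
                  rcases hmem with h | h | h | h | h | h
                  · exact notpref url.toList ['p', 'o', 's', 't', 'g', 'r', 'e', 's', 'q', 'l', '+', 'p', 's', 'y', 'c', 'o', 'p', 'g', ':', '/', '/'] (Bool.not_eq_true _ ▸ Bool.of_not_eq_true h1) ⟨r, by rw [hl, hof _ h]; rfl⟩
                  · exact notpref url.toList ['p', 'o', 's', 't', 'g', 'r', 'e', 's', '+', 'p', 's', 'y', 'c', 'o', 'p', 'g', ':', '/', '/'] (Bool.not_eq_true _ ▸ Bool.of_not_eq_true h2) ⟨r, by rw [hl, hof _ h]; rfl⟩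
                  · exact notpref url.toList ['p', 'o', 's', 't', 'g', 'r', 'e', 's', 'q', 'l', '+', 'p', 's', 'y', 'c', 'o', 'p', 'g', '2', ':', '/', '/'] (Bool.not_eq_true _ ▸ Bool.of_not_eq_true h3) ⟨r, by rw [hl, hof _ h]; rfl⟩
                  · exact notpref url.toList ['p', 'o', 's', 't', 'g', 'r', 'e', 's', '+', 'p', 's', 'y', 'c', 'o', 'p', 'g', '2', ':', '/', '/'] (Bool.not_eq_true _ ▸ Bool.of_not_eq_true h4) ⟨r, by rw [hl, hof _ h]; rfl⟩
                  · exact notpref url.toList ['p', 'o', 's', 't', 'g', 'r', 'e', 's', 'q', 'l', ':', '/', '/'] (Bool.not_eq_true _ ▸ Bool.of_not_eq_true h5) ⟨r, by rw [hl, hof _ h]; rfl⟩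
                  · exact notpref url.toList ['p', 'o', 's', 't', 'g', 'r', 'e', 's', ':', '/', '/'] (Bool.not_eq_true _ ▸ Bool.of_not_eq_true h6) ⟨r, by rw [hl, hof _ h]; rfl⟩
                · have hm' : String.ofList s ∉ pvSchemes := by
                    simpa [PySem.Set.contains] using hm
                  simp [hm']

-- ===== VERDICT (by name: the statement is the Claim_ definition above) =====
theorem normalise_db_url_py_spec : Claim_equal_normalise_db_url_py := by
  intro url _
  unfold Spec_normalise_db_url_py
  exact ab_eq url
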